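-- pv_equiv track=rewrite | github.com/lvreynoso/Call-Routing-Project | scenario2.py | findBestSolution
-- ===== SOURCE A (Python) =====
-- def findBestSolution(solutions):
--     longestString = ''
--     bestPrice = ''
--     for i, rc in enumerate(solutions):
--         route = rc[0]
--         cost = rc[1]
--         # found longer matching route
--         if (len(route) > len(longestString)):
--             longestString = route
--             bestPrice = cost
--         # found better price for same length route
--         elif (len(route) == len(longestString) and bestPrice < cost):
--             longestString = route
--             bestPrice = cost
--
--     if (len(bestPrice) == 0):
--         return None
--     return bestPrice
-- ===== SOURCE B (Python) =====
-- def findBestSolution(solutions):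
--     if not solutions:
--         return None
--     maxlen = max(len(route) for route, _ in solutions)
--     best = max(cost for route, cost in solutions if len(route) == maxlen)
--     return best if best else None
-- ===== Notes on version B (the rewrite author's own statement) =====
-- stated objective: simpler
-- what changed: Replaces the single running-accumulator scan carrying (longestString, bestPrice) state with two declarative passes: max route length, then max cost among routes of that length.
import Mathlib
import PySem

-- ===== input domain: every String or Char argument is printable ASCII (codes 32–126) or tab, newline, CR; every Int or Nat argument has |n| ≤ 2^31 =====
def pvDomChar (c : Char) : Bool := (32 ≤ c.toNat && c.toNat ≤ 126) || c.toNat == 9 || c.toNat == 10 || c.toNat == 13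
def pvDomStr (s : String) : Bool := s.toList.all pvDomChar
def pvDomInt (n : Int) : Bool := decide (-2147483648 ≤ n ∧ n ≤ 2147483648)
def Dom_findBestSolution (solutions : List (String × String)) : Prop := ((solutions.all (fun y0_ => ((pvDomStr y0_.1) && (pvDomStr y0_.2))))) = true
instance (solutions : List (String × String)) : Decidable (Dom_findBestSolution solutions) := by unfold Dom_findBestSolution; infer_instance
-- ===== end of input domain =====

-- B replaces A's single running-accumulator scan with two declarative passes (max route
-- length, then max cost at that length); objective: simpler, same O(n) cost.

-- ===== PORT A =====
-- the body of A's for-loop (state = (longestString, bestPrice))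
def pvStep (acc rc : String × String) : String × String :=
  if PySem.Str.len rc.1 > PySem.Str.len acc.1 then (rc.1, rc.2)
  else if PySem.Str.len rc.1 = PySem.Str.len acc.1 ∧ acc.2 < rc.2 then (rc.1, rc.2)
  else acc

def findBestSolution (solutions : List (String × String)) : Option String :=
  let st := (PySem.List.enumerate solutions 0).foldl (fun acc irc => pvStep acc irc.2) ("", "")
  if PySem.Str.len st.2 = 0 then none else some st.2

-- ===== PORT B =====
def findBestSolution_alt (solutions : List (String × String)) : Option String :=
  match solutions with
  | [] => none
  | s :: t =>
    -- maxlen = max(len(route) for route, _ in solutions)  (running max over a nonempty list)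
    let maxlen := (t.map (fun rc => PySem.Str.len rc.1)).foldl max (PySem.Str.len s.1)
    -- best = max(cost for route, cost in solutions if len(route) == maxlen)
    match ((s :: t).filter (fun rc => PySem.Str.len rc.1 == maxlen)).map (fun rc => rc.2) with
    | [] => none        -- unreachable: a route attaining maxlen passes the filter (Python max never sees an empty iterable here)
    | c :: cs =>
      let best := cs.foldl max c
      if best = "" then none else some best

-- ===== PRECONDITION & SPEC =====
def Spec_findBestSolution (solutions : List (String × String)) (out : Option String) : Prop := out = findBestSolution_alt solutions
instance (solutions : List (String × String)) (out : Option String) : Decidable (Spec_findBestSolution solutions out) := by unfold Spec_findBestSolution; infer_instance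

-- ===== CLAIM (what is proved, stated in full; the proofs are below) =====
def Claim_equal_findBestSolution : Prop := ∀ (solutions : List (String × String)), Dom_findBestSolution solutions → Spec_findBestSolution solutions (findBestSolution solutions)

-- ===== LEMMAS AND PROOFS =====

-- running maximum of route lengths, seeded with M
def pvMlen (xs : List (String × String)) (M : Int) : Int :=
  xs.foldl (fun m rc => max m (PySem.Str.len rc.1)) M

-- costs of the entries whose route length is K
def pvCosts (K : Int) (xs : List (String × String)) : List String :=
  (xs.filter (fun rc => PySem.Str.len rc.1 == K)).map (fun rc => rc.2)

theorem pv_empty_le (s : String) : "" ≤ s := by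
  by_contra h
  rw [not_le, String.lt_iff_toList_lt] at h
  have h2 : s.toList < ([] : List Char) := h
  exact List.not_lt_nil _ h2

theorem pv_max_empty (c : String) : max "" c = c := max_eq_right (pv_empty_le c)

theorem pv_enum_fold (xs : List (String × String)) :
    ∀ (n : Int) (acc : String × String),
      (PySem.List.enumerate xs n).foldl (fun a irc => pvStep a irc.2) acc = xs.foldl pvStep acc := by
  induction xs with
  | nil => intro n acc; rfl
  | cons x t ih =>
    intro n acc
    rw [PySem.List.enumerate_cons, List.foldl_cons, List.foldl_cons, ih]

theorem pv_le_mlen (xs : List (String × String)) : ∀ M : Int, M ≤ pvMlen xs M := by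
  induction xs with
  | nil => intro M; simp [pvMlen]
  | cons x t ih =>
    intro M
    have h1 : M ≤ max M (PySem.Str.len x.1) := le_max_left _ _
    have h2 := ih (max M (PySem.Str.len x.1))
    simp only [pvMlen, List.foldl] at *
    exact le_trans h1 h2

theorem pv_arg_le_mlen (xs : List (String × String)) :
    ∀ (M : Int) (rc : String × String), rc ∈ xs → PySem.Str.len rc.1 ≤ pvMlen xs M := by
  induction xs with
  | nil => intro M rc h; cases h
  | cons x t ih =>
    intro M rc h
    rcases List.mem_cons.mp h with h | h
    · subst h
      have h1 : PySem.Str.len rc.1 ≤ max M (PySem.Str.len rc.1) := le_max_right _ _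
      exact le_trans h1 (pv_le_mlen t _)
    · exact ih _ rc h

theorem pv_exists_mlen (xs : List (String × String)) :
    ∀ M : Int, pvMlen xs M = M ∨ ∃ rc ∈ xs, PySem.Str.len rc.1 = pvMlen xs M := by
  induction xs with
  | nil => intro M; left; rfl
  | cons x t ih =>
    intro M
    rcases ih (max M (PySem.Str.len x.1)) with h | ⟨rc, hm, he⟩
    · by_cases hx : PySem.Str.len x.1 ≤ M
      · left
        show pvMlen t (max M (PySem.Str.len x.1)) = M
        rw [max_eq_left hx] at h ⊢
        exact h
      · right
        refine ⟨x, List.mem_cons_self, ?_⟩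
        show PySem.Str.len x.1 = pvMlen t (max M (PySem.Str.len x.1))
        rw [h, max_eq_right (le_of_not_ge hx)]
    · right
      exact ⟨rc, List.mem_cons_of_mem _ hm, he⟩

theorem pv_costs_cons_eq (K : Int) (x : String × String) (t : List (String × String))
    (h : PySem.Str.len x.1 = K) : pvCosts K (x :: t) = x.2 :: pvCosts K t := by
  unfold pvCosts
  rw [List.filter_cons_of_pos (by simpa using h)]
  rfl

theorem pv_costs_cons_ne (K : Int) (x : String × String) (t : List (String × String))
    (h : ¬ PySem.Str.len x.1 = K) : pvCosts K (x :: t) = pvCosts K t := by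
  unfold pvCosts
  rw [List.filter_cons_of_neg (by simpa using h)]

-- the characterisation of A's accumulator loop: its final bestPrice is the max cost
-- among the entries of maximal route length (the seed (L, B) acting as a virtual entry)
theorem pv_main (xs : List (String × String)) :
    ∀ (L B : String),
      (xs.foldl pvStep (L, B)).2 =
        if pvMlen xs (PySem.Str.len L) = PySem.Str.len L
        then (pvCosts (PySem.Str.len L) xs).foldl max B
        else (pvCosts (pvMlen xs (PySem.Str.len L)) xs).foldl max "" := by
  induction xs with
  | nil => intro L B; simp [pvMlen, pvCosts]
  | cons x t ih =>
    intro L B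
    have hmlen : pvMlen (x :: t) (PySem.Str.len L)
        = pvMlen t (max (PySem.Str.len L) (PySem.Str.len x.1)) := rfl
    rw [List.foldl_cons]
    by_cases h1 : PySem.Str.len x.1 > PySem.Str.len L
    · -- first branch of the loop body: a strictly longer route, new state (x.1, x.2)
      have hstep : pvStep (L, B) x = (x.1, x.2) := by
        unfold pvStep; dsimp only; rw [if_pos h1]
      rw [hstep, ih, hmlen, max_eq_right (le_of_lt h1)]
      have hle := pv_le_mlen t (PySem.Str.len x.1)
      have hKM : ¬ pvMlen t (PySem.Str.len x.1) = PySem.Str.len L := by omega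
      rw [if_neg hKM]
      by_cases h2 : pvMlen t (PySem.Str.len x.1) = PySem.Str.len x.1
      · rw [if_pos h2, h2]
        rw [pv_costs_cons_eq _ x t rfl, List.foldl_cons, pv_max_empty]
      · rw [if_neg h2]
        rw [pv_costs_cons_ne _ x t (by omega)]
    · by_cases h2 : PySem.Str.len x.1 = PySem.Str.len L ∧ B < x.2
      · -- second branch: same length, strictly better price, new state (x.1, x.2)
        have hstep : pvStep (L, B) x = (x.1, x.2) := by
          unfold pvStep; dsimp only; rw [if_neg h1, if_pos h2]
        rw [hstep, ih, hmlen, max_eq_left (le_of_not_gt h1), h2.1]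
        by_cases h3 : pvMlen t (PySem.Str.len L) = PySem.Str.len L
        · rw [if_pos h3, if_pos h3]
          rw [pv_costs_cons_eq _ x t h2.1, List.foldl_cons, max_eq_right (le_of_lt h2.2)]
        · rw [if_neg h3, if_neg h3]
          rw [pv_costs_cons_ne _ x t (by rw [h2.1]; exact fun h => h3 h.symm)]
      · -- else: the entry loses, state unchanged
        have hstep : pvStep (L, B) x = (L, B) := by
          unfold pvStep; dsimp only; rw [if_neg h1, if_neg h2]
        rw [hstep, ih, hmlen, max_eq_left (le_of_not_gt h1)]
        by_cases h3 : pvMlen t (PySem.Str.len L) = PySem.Str.len L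
        · rw [if_pos h3, if_pos h3]
          by_cases h4 : PySem.Str.len x.1 = PySem.Str.len L
          · have hc : x.2 ≤ B := by
              by_contra hc
              exact h2 ⟨h4, lt_of_not_ge hc⟩
            rw [pv_costs_cons_eq _ x t h4, List.foldl_cons, max_eq_left hc]
          · rw [pv_costs_cons_ne _ x t h4]
        · rw [if_neg h3, if_neg h3]
          have hle := pv_le_mlen t (PySem.Str.len L)
          have h1' := le_of_not_gt h1
          rw [pv_costs_cons_ne _ x t (by omega)]

theorem pv_len_zero_iff (s : String) : PySem.Str.len s = 0 ↔ s = "" := by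
  rw [PySem.Str.len_eq]
  constructor
  · intro h
    have h2 : s.length = 0 := by exact_mod_cast h
    exact String.length_eq_zero_iff.mp h2
  · intro h; subst h; rfl

-- ===== VERDICT (by name: the statement is the Claim_ definition above) =====
theorem findBestSolution_spec : Claim_equal_findBestSolution := by
  intro solutions _
  show findBestSolution solutions = findBestSolution_alt solutions
  cases solutions with
  | nil => rfl
  | cons s t =>
    rw [findBestSolution, findBestSolution_alt]
    rw [pv_enum_fold (s :: t) 0]
    have hnn : (0 : Int) ≤ PySem.Str.len s.1 := by
      rw [PySem.Str.len_eq]; positivity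
    -- B's maxlen equals pvMlen (s :: t) 0
    have hmax : (t.map (fun rc => PySem.Str.len rc.1)).foldl max (PySem.Str.len s.1)
        = pvMlen (s :: t) 0 := by
      show _ = pvMlen t (max 0 (PySem.Str.len s.1))
      rw [max_eq_right hnn, pvMlen, List.foldl_map]
    -- A's final price is the running max over pvCosts, seeded with ""
    have hP : ((s :: t).foldl pvStep ("", "")).2
        = (pvCosts (pvMlen (s :: t) 0) (s :: t)).foldl max "" := by
      rw [pv_main]
      have hM0 : PySem.Str.len ("" : String) = 0 := rfl
      rw [hM0]
      by_cases h : pvMlen (s :: t) 0 = 0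
      · rw [if_pos h, h]
      · rw [if_neg h]
    -- pvCosts (pvMlen (s :: t) 0) (s :: t) is nonempty
    have hne : pvCosts (pvMlen (s :: t) 0) (s :: t) ≠ [] := by
      have hw : ∃ rc ∈ s :: t, PySem.Str.len rc.1 = pvMlen (s :: t) 0 := by
        rcases pv_exists_mlen (s :: t) 0 with h | h
        · refine ⟨s, List.mem_cons_self, ?_⟩
          have hle : PySem.Str.len s.1 ≤ pvMlen (s :: t) 0 :=
            pv_arg_le_mlen (s :: t) 0 s List.mem_cons_self
          omega
        · exact h
      rcases hw with ⟨rc, hmem, hlen⟩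
      simp only [pvCosts, ne_eq, List.map_eq_nil_iff, List.filter_eq_nil_iff]
      intro hall
      exact (hall rc hmem) (beq_iff_eq.mpr hlen)
    simp only [hmax]
    rcases hcs : pvCosts (pvMlen (s :: t) 0) (s :: t) with _ | ⟨c, cs⟩
    · exact absurd hcs hne
    · have hsc : ((s :: t).filter
          (fun rc => PySem.Str.len rc.1 == pvMlen (s :: t) 0)).map (fun rc => rc.2)
          = c :: cs := hcs
      rw [hsc, hP, hcs, List.foldl_cons, pv_max_empty]
      dsimp only
      by_cases hb : cs.foldl max c = ""
      · rw [hb, if_pos rfl, if_pos (show PySem.Str.len "" = 0 from rfl)]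
      · rw [if_neg hb, if_neg (fun h => hb ((pv_len_zero_iff _).mp h))]
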